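-- pv_equiv track=rewrite | github.com/pschale/pyCondorSTAMP | condorSTAMPSupportLib_v2.py | job_heirarchy
-- ===== SOURCE A (Python) =====
-- def job_heirarchy(job_tracker, output_string):
--     #list_of_orderings = []
--     output_string += "\n\n"
--     for num in range(len(job_tracker) - 1):
--         pair_1 = job_tracker[num]
--         pair_2 = job_tracker[num+1]
--         parent = "PARENT "
--         child = "CHILD"
--         for num in range(pair_1[0], pair_1[1]+1):
--             parent += str(num) + " "
--         for num in range(pair_2[0], pair_2[1]+1):
--             child += " " + str(num)
--         #order_string = parent + child
--         output_string += parent + child + "\n\n"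
--         #list_of_orderings.append(order_string)
--     #output_string = "\n\n".join(string for string in list_of_orderings)
--     return output_string
-- ===== SOURCE B (Python) =====
-- def job_heirarchy(job_tracker, output_string):
--     # Recursive single pass: carry the previous range's stringified numbers forward,
--     # so each range is stringified exactly once and no indexing is used.
--     def nums(p):
--         return [str(n) for n in range(p[0], p[1] + 1)]
--
--     def go(prev_nums, rest):
--         if not rest:
--             return ""
--         cur = nums(rest[0])
--         line = ("PARENT " + "".join(s + " " for s in prev_nums)
--                 + "CHILD" + "".join(" " + s for s in cur) + "\n\n")
--         return line + go(cur, rest[1:])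
--
--     if not job_tracker:
--         return output_string + "\n\n"
--     return output_string + "\n\n" + go(nums(job_tracker[0]), job_tracker[1:])
-- ===== Notes on version B (the rewrite author's own statement) =====
-- stated objective: alternative
-- what changed: B replaces A's index loop over adjacent positions (which re-stringifies every range twice, once as parent and once as child) by structural recursion on the list that carries the previous range's stringified numbers forward as an accumulator, so each range is stringified exactly once and no indexing occurs.
import Mathlib
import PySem

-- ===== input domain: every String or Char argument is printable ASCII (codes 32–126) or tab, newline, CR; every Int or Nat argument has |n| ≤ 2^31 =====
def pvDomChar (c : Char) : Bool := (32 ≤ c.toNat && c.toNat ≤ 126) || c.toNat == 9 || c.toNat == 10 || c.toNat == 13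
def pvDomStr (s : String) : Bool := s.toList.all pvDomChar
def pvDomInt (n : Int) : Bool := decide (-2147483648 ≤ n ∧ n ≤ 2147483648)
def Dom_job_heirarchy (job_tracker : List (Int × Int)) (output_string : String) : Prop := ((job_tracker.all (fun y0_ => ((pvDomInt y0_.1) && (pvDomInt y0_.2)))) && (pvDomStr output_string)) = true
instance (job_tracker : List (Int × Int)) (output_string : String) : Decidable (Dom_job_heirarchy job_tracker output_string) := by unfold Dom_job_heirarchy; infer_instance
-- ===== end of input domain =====

-- ===== PORT A =====
-- B is a structural recursion over the list carrying the previous range's stringified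
-- numbers as an accumulator (each range stringified once, no indexing); A is an index
-- loop that stringifies each range twice. Objective: alternative decomposition.
def job_heirarchy (job_tracker : List (Int × Int)) (output_string : String) : String :=
  let output_string := output_string ++ "\n\n"
  (List.range (job_tracker.length - 1)).foldl (fun (output_string : String) (num : Nat) =>
    let pair_1 := (PySem.List.pyGet? job_tracker (num : Int)).getD (0, 0)
    let pair_2 := (PySem.List.pyGet? job_tracker ((num : Int) + 1)).getD (0, 0)
    let parent := (PySem.List.pyRange pair_1.1 (pair_1.2 + 1) 1).foldl
      (fun parent n => parent ++ PySem.Int.toStr n ++ " ") "PARENT "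
    let child := (PySem.List.pyRange pair_2.1 (pair_2.2 + 1) 1).foldl
      (fun child n => child ++ " " ++ PySem.Int.toStr n) "CHILD"
    output_string ++ parent ++ child ++ "\n\n") output_string

-- ===== PORT B =====
-- the stringified numbers of one range
def pvNums (p : Int × Int) : List String :=
  (PySem.List.pyRange p.1 (p.2 + 1) 1).map PySem.Int.toStr

-- recursion over the remaining ranges, carrying the previous range's number strings
def pvGo (prev_nums : List String) (rest : List (Int × Int)) : String :=
  match rest with
  | [] => ""
  | q :: rs =>
    let cur := pvNums q
    ("PARENT " ++ String.join (prev_nums.map (fun s => s ++ " "))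
      ++ "CHILD" ++ String.join (cur.map (fun s => " " ++ s)) ++ "\n\n") ++ pvGo cur rs

def job_heirarchy_alt (job_tracker : List (Int × Int)) (output_string : String) : String :=
  match job_tracker with
  | [] => output_string ++ "\n\n"
  | p :: rest => output_string ++ "\n\n" ++ pvGo (pvNums p) rest

-- ===== PRECONDITION & SPEC =====
def Spec_job_heirarchy (job_tracker : List (Int × Int)) (output_string : String) (out : String) : Prop := out = job_heirarchy_alt job_tracker output_string
instance (job_tracker : List (Int × Int)) (output_string : String) (out : String) : Decidable (Spec_job_heirarchy job_tracker output_string out) := by unfold Spec_job_heirarchy; infer_instance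

-- ===== CLAIM (what is proved, stated in full; the proofs are below) =====
def Claim_equal_job_heirarchy : Prop := ∀ (job_tracker : List (Int × Int)) (output_string : String), Dom_job_heirarchy job_tracker output_string → Spec_job_heirarchy job_tracker output_string (job_heirarchy job_tracker output_string)

-- ===== LEMMAS AND PROOFS =====
theorem pvFoldl_shift : ∀ (l : List String) (s t : String),
    List.foldl (· ++ ·) (s ++ t) l = s ++ List.foldl (· ++ ·) t l := by
  intro l
  induction l with
  | nil => intro s t; rfl
  | cons u l ih =>
    intro s t
    show List.foldl (· ++ ·) (s ++ t ++ u) l = _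
    rw [String.append_assoc, ih]
    rfl

theorem pvJoin_cons (s : String) (l : List String) : String.join (s :: l) = s ++ String.join l := by
  have h := pvFoldl_shift l s ""
  simp only [String.append_empty] at h
  simpa [String.join] using h

theorem pvFoldl_str {α : Type} (g : α → String) :
    ∀ (L : List α) (init : String),
      L.foldl (fun s n => s ++ g n) init = init ++ String.join (L.map g) := by
  intro L
  induction L with
  | nil => intro init; simp [String.join]
  | cons a L ih =>
    intro init
    simp only [List.foldl_cons, List.map_cons, pvJoin_cons, ih, String.append_assoc]

theorem pvParent_eq (p : Int × Int) :
    (PySem.List.pyRange p.1 (p.2 + 1) 1).foldl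
      (fun parent n => parent ++ PySem.Int.toStr n ++ " ") "PARENT "
    = "PARENT " ++ String.join ((pvNums p).map (fun s => s ++ " ")) := by
  rw [pvNums, List.map_map]
  rw [show (fun (parent : String) n => parent ++ PySem.Int.toStr n ++ " ")
        = fun (parent : String) n => parent ++ (PySem.Int.toStr n ++ " ")
      from by funext s n; rw [String.append_assoc]]
  exact pvFoldl_str _ _ _

theorem pvChild_eq (p : Int × Int) :
    (PySem.List.pyRange p.1 (p.2 + 1) 1).foldl
      (fun child n => child ++ " " ++ PySem.Int.toStr n) "CHILD"
    = "CHILD" ++ String.join ((pvNums p).map (fun s => " " ++ s)) := by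
  rw [pvNums, List.map_map]
  rw [show (fun (child : String) n => child ++ " " ++ PySem.Int.toStr n)
        = fun (child : String) n => child ++ (" " ++ PySem.Int.toStr n)
      from by funext s n; rw [String.append_assoc]]
  exact pvFoldl_str _ _ _

theorem pvGet_shift {α : Type} (x : α) (l : List α) (j : Int) (h : 0 ≤ j) :
    PySem.List.pyGet? (x :: l) (j + 1) = PySem.List.pyGet? l j := by
  have h1 : (0:Int) ≤ j + 1 := by omega
  have h2 : ((j + 1 < (l.length + 1 : Int)) ↔ (j < (l.length : Int))) := by omega
  simp only [PySem.List.pyGet?, PySem.List.pyIdx?, List.length_cons, h, h1, if_true,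
    Nat.cast_add, Nat.cast_one, h2]
  by_cases h3 : j < (l.length : Int)
  · have : (j + 1).toNat = j.toNat + 1 := by omega
    simp [h3, this]
  · simp [h3]

theorem pvMain : ∀ (l : List (Int × Int)) (x : Int × Int) (acc : String),
    (List.range ((x :: l).length - 1)).foldl (fun (s : String) (num : Nat) =>
      s ++ (PySem.List.pyRange ((PySem.List.pyGet? (x :: l) (num : Int)).getD (0, 0)).1
              (((PySem.List.pyGet? (x :: l) (num : Int)).getD (0, 0)).2 + 1)).foldl
            (fun parent n => parent ++ PySem.Int.toStr n ++ " ") "PARENT "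
        ++ (PySem.List.pyRange ((PySem.List.pyGet? (x :: l) ((num : Int) + 1)).getD (0, 0)).1
              (((PySem.List.pyGet? (x :: l) ((num : Int) + 1)).getD (0, 0)).2 + 1)).foldl
            (fun child n => child ++ " " ++ PySem.Int.toStr n) "CHILD"
        ++ "\n\n") acc
    = acc ++ pvGo (pvNums x) l := by
  intro l
  induction l with
  | nil => intro x acc; simp [pvGo]
  | cons y rest ih =>
    intro x acc
    have hshift : ∀ (i : Nat) (z : Int × Int) (m : List (Int × Int)),
        PySem.List.pyGet? (z :: m) ((i : Int) + 1) = PySem.List.pyGet? m (i : Int) :=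
      fun i z m => pvGet_shift z m (i : Int) (Int.natCast_nonneg i)
    simp only [List.length_cons, Nat.add_sub_cancel, List.range_succ_eq_map,
      List.foldl_cons, List.foldl_map]
    have hb : ∀ (s : String) (i : Nat),
        s ++ (PySem.List.pyRange
                ((PySem.List.pyGet? (x :: y :: rest) ((i.succ : Nat) : Int)).getD (0, 0)).1
                (((PySem.List.pyGet? (x :: y :: rest) ((i.succ : Nat) : Int)).getD (0, 0)).2 + 1)).foldl
              (fun parent n => parent ++ PySem.Int.toStr n ++ " ") "PARENT "
          ++ (PySem.List.pyRange
                ((PySem.List.pyGet? (x :: y :: rest) (((i.succ : Nat) : Int) + 1)).getD (0, 0)).1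
                (((PySem.List.pyGet? (x :: y :: rest) (((i.succ : Nat) : Int) + 1)).getD (0, 0)).2 + 1)).foldl
              (fun child n => child ++ " " ++ PySem.Int.toStr n) "CHILD"
          ++ "\n\n"
        = s ++ (PySem.List.pyRange ((PySem.List.pyGet? (y :: rest) (i : Int)).getD (0, 0)).1
                (((PySem.List.pyGet? (y :: rest) (i : Int)).getD (0, 0)).2 + 1)).foldl
              (fun parent n => parent ++ PySem.Int.toStr n ++ " ") "PARENT "
          ++ (PySem.List.pyRange ((PySem.List.pyGet? (y :: rest) ((i : Int) + 1)).getD (0, 0)).1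
                (((PySem.List.pyGet? (y :: rest) ((i : Int) + 1)).getD (0, 0)).2 + 1)).foldl
              (fun child n => child ++ " " ++ PySem.Int.toStr n) "CHILD"
          ++ "\n\n" := by
      intro s i
      rw [show ((i.succ : Nat) : Int) = (i : Int) + 1 by push_cast; ring]
      rw [hshift i x (y :: rest),
          pvGet_shift x (y :: rest) ((i : Int) + 1) (by positivity),
          hshift i y rest]
    simp only [hb]
    have ih' := ih y
    simp only [List.length_cons, Nat.add_sub_cancel] at ih'
    rw [ih']
    rw [show ((0 : Nat) : Int) + 1 = ((1 : Nat) : Int) by norm_num]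
    rw [PySem.List.pyGet?_natCast, PySem.List.pyGet?_natCast]
    simp only [List.getElem?_cons_zero, List.getElem?_cons_succ, Option.getD_some]
    rw [pvParent_eq x, pvChild_eq y]
    show acc ++ _ ++ _ ++ "\n\n" ++ pvGo (pvNums y) rest = acc ++ pvGo (pvNums x) (y :: rest)
    simp only [pvGo, String.append_assoc]

-- ===== VERDICT (by name: the statement is the Claim_ definition above) =====
theorem job_heirarchy_spec : Claim_equal_job_heirarchy := by
  intro jt out _
  show job_heirarchy jt out = job_heirarchy_alt jt out
  cases jt with
  | nil => rfl
  | cons x l =>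
    rw [job_heirarchy]
    simp only []
    rw [pvMain l x]
    rw [job_heirarchy_alt, String.append_assoc]
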